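-- pv_equiv track=rewrite | github.com/LoveOfSelfLife/LifeTimeLines | common/entity_consumer.py | _split_list_into_ranges_of_size_num
-- ===== SOURCE A (Python) =====
-- def _find_next_split(p, L, num):
--     """
--     """
--     q = p+num
--     while q+1 < len(L) and L[q] == L[q+1]:
--         q += 1
--     return q
--
-- def _split_list_into_ranges_of_size_num(ts_list, num):
--     """
--     break up a list into smaller chunks, where each chunk is represented as a range with start & end indices, where each chunk has approximately length equal to num
--     return an iterator over those ranges
--     this method will only break ts_list at a point N, if ts_list[N-1] is not equalt to ts_list[N], otherwise it will increase N until it finds a different value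
--     thus, that is why the resulting ranges are approximate, some ranges may be longer than num
--     e.g. if we want to break up the list [1,2,3,4,5,6,7] into ranges of size 3, the result will be [(0,3), (3,6)], representing the ranges [1,2,3] and [4,5,6]
--     however, if we want to break up the list [1,2,3,3,4,5,5,5,5,6,7] into ranges of size 3, the result will be [(0,4), (4,9), (9,11)], representing the ranges [1,2,3,3], [4,5,5,5,5] and [6,7]
--     Note that the end of the first range, 3, is not equal to the start of the second range, 4, so the first range breaks with 4 elements, not 3 elements
--     """
--     len_L = len(ts_list)
--     p = 0
--     while p < len_L:
--         splits_at = _find_next_split(p, ts_list, num)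
--         if splits_at < len_L:
--             yield (p, splits_at)
--         else:
--             yield (p, None)
--         p = splits_at+1
-- ===== SOURCE B (Python) =====
-- def _split_list_into_ranges_of_size_num(ts_list, num):
--     n = len(ts_list)
--     p = 0
--     for i in range(n):
--         if i >= p + num and (i + 1 == n or ts_list[i] != ts_list[i + 1]) and p + num < n:
--             yield (p, i)
--             p = i + 1
--     if p < n:
--         yield (p, None)
-- ===== Notes on version B (the rewrite author's own statement) =====
-- stated objective: simpler
-- what changed: Replaces the outer pointer-jump loop plus the inner run-scanning helper _find_next_split with a single flat for-loop over all indices that emits a chunk whenever the current index is past p+num and sits at a value change, with one trailing (p, None) check; no helper and no nested scan remain.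
-- outside the precondition, e.g. on _split_list_into_ranges_of_size_num([5, 6], -1): A does not finish within the time limit, B returns [(0, 0), (1, 1)]; on _split_list_into_ranges_of_size_num([5, 5], -1): A returns [(0, 1)], B returns [(0, 1)]
import Mathlib
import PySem

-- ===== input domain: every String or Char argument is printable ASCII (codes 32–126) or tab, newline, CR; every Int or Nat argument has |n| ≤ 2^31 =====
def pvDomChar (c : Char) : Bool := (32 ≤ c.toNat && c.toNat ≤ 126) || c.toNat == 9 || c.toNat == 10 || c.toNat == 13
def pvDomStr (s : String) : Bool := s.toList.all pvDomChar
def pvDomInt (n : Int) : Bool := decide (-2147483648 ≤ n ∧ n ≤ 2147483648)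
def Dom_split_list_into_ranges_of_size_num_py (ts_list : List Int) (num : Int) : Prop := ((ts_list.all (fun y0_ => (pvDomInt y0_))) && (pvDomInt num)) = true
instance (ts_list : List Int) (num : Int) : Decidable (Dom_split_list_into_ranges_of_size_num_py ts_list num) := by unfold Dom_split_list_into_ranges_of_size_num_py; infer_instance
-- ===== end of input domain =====

-- ===== PORT A =====
-- B replaces A's outer pointer-jump loop + inner run-scan helper by one flat indexed pass; return-value equivalence proved for num >= 0.
-- _find_next_split: the inner while loop, fuel = |L| suffices whenever the start index is nonnegative
def pvFindNextSplit (L : List Int) (fuel : Nat) (q : Int) : Int :=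
  match fuel with
  | 0 => q
  | f + 1 =>
    if q + 1 < (L.length : Int) ∧ PySem.List.pyGetD L q 0 = PySem.List.pyGetD L (q + 1) 0 then
      pvFindNextSplit L f (q + 1)
    else q

-- the outer while loop of A; fuel = |L| + 1 suffices for num >= 0 since p strictly increases
def pvAOuter (L : List Int) (num : Int) (fuel : Nat) (p : Int) : List (Int × Option Int) :=
  match fuel with
  | 0 => []
  | f + 1 =>
    if p < (L.length : Int) then
      let splits_at := pvFindNextSplit L L.length (p + num)
      (if splits_at < (L.length : Int) then (p, some splits_at) else (p, none)) ::
        pvAOuter L num f (splits_at + 1)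
    else []

def split_list_into_ranges_of_size_num_py (ts_list : List Int) (num : Int) : List (Int × Option Int) :=
  pvAOuter ts_list num (ts_list.length + 1) 0

-- ===== PORT B =====
-- one step of B's flat for-loop: state is (p, accumulated output)
def pvBStep (L : List Int) (num : Int) (st : Int × List (Int × Option Int)) (i : Int) :
    Int × List (Int × Option Int) :=
  let p := st.1
  if p + num ≤ i ∧ (i + 1 = (L.length : Int) ∨ PySem.List.pyGetD L i 0 ≠ PySem.List.pyGetD L (i + 1) 0) ∧ p + num < (L.length : Int) then
    (i + 1, st.2 ++ [(st.1, some i)])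
  else st

def split_list_into_ranges_of_size_num_py_alt (ts_list : List Int) (num : Int) : List (Int × Option Int) :=
  let n : Int := ts_list.length
  let st := (PySem.List.pyRange 0 n 1).foldl (pvBStep ts_list num) (0, [])
  if st.1 < n then st.2 ++ [(st.1, none)] else st.2

-- ===== PRECONDITION & SPEC =====
-- Pre_ excludes num < 0: there A's inner scan starts at a negative index, so A loops forever or
-- raises IndexError on most such inputs (its occasional returned value rides on Python's
-- negative-index wraparound); B does the natural thing there.
def Pre_split_list_into_ranges_of_size_num_py (ts_list : List Int) (num : Int) : Prop := 0 ≤ num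
instance (ts_list : List Int) (num : Int) : Decidable (Pre_split_list_into_ranges_of_size_num_py ts_list num) := by unfold Pre_split_list_into_ranges_of_size_num_py; infer_instance
def pvWitness_split_list_into_ranges_of_size_num_py : List Int × Int := ([1, 2, 2, 3, 3, 3, 4], 2)

def Spec_split_list_into_ranges_of_size_num_py (ts_list : List Int) (num : Int) (out : List (Int × Option Int)) : Prop := out = split_list_into_ranges_of_size_num_py_alt ts_list num
instance (ts_list : List Int) (num : Int) (out : List (Int × Option Int)) : Decidable (Spec_split_list_into_ranges_of_size_num_py ts_list num out) := by unfold Spec_split_list_into_ranges_of_size_num_py; infer_instance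

-- ===== CLAIM (what is proved, stated in full; the proofs are below) =====
def Claim_equal_split_list_into_ranges_of_size_num_py : Prop := ∀ (ts_list : List Int) (num : Int), Dom_split_list_into_ranges_of_size_num_py ts_list num → Pre_split_list_into_ranges_of_size_num_py ts_list num → Spec_split_list_into_ranges_of_size_num_py ts_list num (split_list_into_ranges_of_size_num_py ts_list num)

-- ===== LEMMAS AND PROOFS =====

-- characterisation of the inner while loop of A
theorem pvFindNextSplit_spec (L : List Int) (fuel : Nat) (q : Int)
    (hfuel : (L.length : Int) - 1 - q ≤ (fuel : Int)) :
    q ≤ pvFindNextSplit L fuel q ∧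
    (∀ i, q ≤ i → i < pvFindNextSplit L fuel q →
      i + 1 < (L.length : Int) ∧ PySem.List.pyGetD L i 0 = PySem.List.pyGetD L (i + 1) 0) ∧
    ¬ (pvFindNextSplit L fuel q + 1 < (L.length : Int) ∧
       PySem.List.pyGetD L (pvFindNextSplit L fuel q) 0 = PySem.List.pyGetD L (pvFindNextSplit L fuel q + 1) 0) := by
  induction fuel generalizing q with
  | zero =>
    refine ⟨le_refl q, fun i h1 h2 => absurd (lt_of_le_of_lt h1 h2) (by simp [pvFindNextSplit]), ?_⟩
    simp only [pvFindNextSplit]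
    rintro ⟨h1, -⟩
    omega
  | succ f ih =>
    by_cases hc : q + 1 < (L.length : Int) ∧ PySem.List.pyGetD L q 0 = PySem.List.pyGetD L (q + 1) 0
    · have hrw : pvFindNextSplit L (f + 1) q = pvFindNextSplit L f (q + 1) := by
        simp [pvFindNextSplit, hc]
      obtain ⟨ih1, ih2, ih3⟩ := ih (q + 1) (by push_cast; push_cast at hfuel; omega)
      rw [hrw]
      refine ⟨by omega, fun i h1 h2 => ?_, ih3⟩
      rcases eq_or_lt_of_le h1 with h | h
      · exact h ▸ hc
      · exact ih2 i (by omega) h2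
    · have hrw : pvFindNextSplit L (f + 1) q = q := by simp only [pvFindNextSplit, if_neg hc]
      rw [hrw]
      exact ⟨le_refl q, fun i h1 h2 => absurd (lt_of_le_of_lt h1 h2) (lt_irrefl q), hc⟩

theorem pvFindNextSplit_of_big (L : List Int) (fuel : Nat) (q : Int)
    (h : (L.length : Int) ≤ q + 1) : pvFindNextSplit L fuel q = q := by
  cases fuel with
  | zero => rfl
  | succ f =>
    simp only [pvFindNextSplit]
    rw [if_neg]
    rintro ⟨h1, -⟩
    omega

-- a block of indices on which B's step leaves the state unchanged
theorem pvFold_skip (L : List Int) (num : Int) (a b : Int) (st : Int × List (Int × Option Int))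
    (h : ∀ i, a ≤ i → i < b → pvBStep L num st i = st) :
    (PySem.List.pyRange a b 1).foldl (pvBStep L num) st = st := by
  by_cases hab : b ≤ a
  · rw [PySem.List.pyRange_one_eq_nil hab]; rfl
  · push_neg at hab
    have : ∃ k : Nat, b - a = (k : Int) := ⟨(b - a).toNat, by omega⟩
    obtain ⟨k, hk⟩ := this
    clear hab
    induction k generalizing a st with
    | zero =>
      rw [PySem.List.pyRange_one_eq_nil (by omega)]; rfl
    | succ m ih =>
      rw [PySem.List.pyRange_one_cons (by omega)]
      simp only [List.foldl_cons]
      rw [h a le_rfl (by omega)]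
      exact ih (a + 1) st (fun i h1 h2 => h i (by omega) h2) (by omega)

-- main invariant: B's fold from position p plus the trailing check equals acc ++ A's loop from p
theorem pvMain (L : List Int) (num : Int) (hnum : 0 ≤ num) (k fA : Nat) :
    ∀ (p : Int) (acc : List (Int × Option Int)), 0 ≤ p →
    (L.length : Int) - p ≤ (k : Int) → (k : Int) < (fA : Int) →
    (let st := (PySem.List.pyRange p (L.length : Int) 1).foldl (pvBStep L num) (p, acc);
     if st.1 < (L.length : Int) then st.2 ++ [(st.1, none)] else st.2) =
    acc ++ pvAOuter L num fA p := by
  induction k generalizing fA with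
  | zero =>
    intro p acc hp hk hfA
    have hn : (L.length : Int) ≤ p := by omega
    obtain ⟨f, rfl⟩ : ∃ f, fA = f + 1 := ⟨fA - 1, by omega⟩
    rw [PySem.List.pyRange_one_eq_nil hn]
    simp only [List.foldl_nil, pvAOuter]
    rw [if_neg (by omega), if_neg (by omega), List.append_nil]
  | succ m ih =>
    intro p acc hp hk hfA
    obtain ⟨f, rfl⟩ : ∃ f, fA = f + 1 := ⟨fA - 1, by omega⟩
    by_cases hpn : p < (L.length : Int)
    · by_cases hbig : (L.length : Int) ≤ p + num
      · -- None case: no index fires, A emits (p, none) and stops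
        have hs : pvFindNextSplit L L.length (p + num) = p + num :=
          pvFindNextSplit_of_big L L.length (p + num) (by omega)
        have hskip : (PySem.List.pyRange p (L.length : Int) 1).foldl (pvBStep L num) (p, acc) = (p, acc) := by
          refine pvFold_skip L num p (L.length : Int) (p, acc) (fun i h1 h2 => ?_)
          simp only [pvBStep]
          rw [if_neg]
          rintro ⟨-, -, h3⟩
          omega
        rw [hskip]
        simp only [pvAOuter, hs]
        rw [if_pos hpn, if_pos hpn, if_neg (show ¬ (p + num < (L.length : Int)) by omega)]
        have hnext : pvAOuter L num f (p + num + 1) = [] := by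
          obtain ⟨g, rfl⟩ : ∃ g, f = g + 1 := ⟨f - 1, by omega⟩
          simp only [pvAOuter]
          rw [if_neg (by omega)]
        rw [hnext]
      · -- Some case: A's split point s exists below L.length
        push_neg at hbig
        set s := pvFindNextSplit L L.length (p + num) with hs_def
        obtain ⟨hs1, hs2, hs3⟩ := pvFindNextSplit_spec L L.length (p + num) (by omega)
        have hsn : s < (L.length : Int) := by
          rcases eq_or_lt_of_le hs1 with h | h
          · omega
          · have := hs2 (s - 1) (by omega) (by omega)
            omega
        -- split the index range at s and at s+1
        rw [PySem.List.pyRange_one_append p s (L.length : Int) (by omega) (by omega),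
            PySem.List.pyRange_one_cons (show s < (L.length : Int) by omega)]
        rw [List.foldl_append]
        have hskip : (PySem.List.pyRange p s 1).foldl (pvBStep L num) (p, acc) = (p, acc) := by
          refine pvFold_skip L num p s (p, acc) (fun i h1 h2 => ?_)
          simp only [pvBStep]
          rw [if_neg]
          rintro ⟨hc1, hc2, -⟩
          have := hs2 i hc1 h2
          rcases hc2 with h | h <;> [omega; exact h this.2]
        rw [hskip]
        simp only [List.foldl_cons]
        have hfire : pvBStep L num (p, acc) s = (s + 1, acc ++ [(p, some s)]) := by
          simp only [pvBStep]
          rw [if_pos]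
          refine ⟨hs1, ?_, hbig⟩
          by_cases heq : PySem.List.pyGetD L s 0 = PySem.List.pyGetD L (s + 1) 0
          · left
            by_contra hne
            exact hs3 ⟨by omega, heq⟩
          · right; exact heq
        rw [hfire]
        have := ih f (s + 1) (acc ++ [(p, some s)]) (by omega) (by push_cast; push_cast at hk; omega) (by push_cast; push_cast at hfA; omega)
        simp only at this
        rw [this]
        simp only [pvAOuter]
        rw [if_pos hpn, ← hs_def, if_pos hsn, List.append_assoc]
        rfl
    · -- p past the end: both sides are acc
      rw [PySem.List.pyRange_one_eq_nil (by omega)]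
      simp only [List.foldl_nil, pvAOuter]
      rw [if_neg hpn, if_neg hpn, List.append_nil]

-- ===== VERDICT (by name: the statement is the Claim_ definition above) =====
theorem split_list_into_ranges_of_size_num_py_spec : Claim_equal_split_list_into_ranges_of_size_num_py := by
  intro ts_list num _hdom hnum
  unfold Spec_split_list_into_ranges_of_size_num_py
  unfold split_list_into_ranges_of_size_num_py split_list_into_ranges_of_size_num_py_alt
  have := pvMain ts_list num hnum ts_list.length (ts_list.length + 1) 0 []
    le_rfl (by omega) (by push_cast; omega)
  simpa using this.symm
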